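-- pv_equiv track=rewrite | github.com/Parkbyounghyo/nori-ai-java | nori-server/app/service/source_extractor.py | structure_to_chunks
-- ===== SOURCE A (Python) =====
-- from typing import Iterator
--
-- def _project_name(file_path: str) -> str:
--     normalized = file_path.replace("\\", "/").strip("/")
--     if not normalized:
--         return "unknown"
--     return normalized.split("/", 1)[0]
--
-- def structure_to_chunks(items: list[dict], file_path: str, max_per_chunk: int = 8) -> Iterator[tuple[str, dict]]:
--     del max_per_chunk
--     for item in items:
--         kind = item.get("type", "item")
--         name = item.get("name", "")
--         desc = (item.get("description") or item.get("comment") or "").strip()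
--
--         if kind == "method":
--             text = (
--                 "TYPE\nController/Service Method\n\n"
--                 f"PROJECT\n{item.get('project', _project_name(file_path))}\n\n"
--                 f"FILE\n{item.get('file_path', file_path)}\n\n"
--                 f"CLASS\n{item.get('class_name', '')}\n\n"
--                 f"METHOD\n{item.get('method_name', '')}()\n\n"
--                 f"SIGNATURE\n{item.get('signature', '')}\n\n"
--                 f"PARAMETERS\n{item.get('parameters', '')}\n\n"
--                 f"RETURN TYPE\n{item.get('return_type', '')}\n\n"
--                 f"DESCRIPTION\n{desc}"
--             )
--         elif kind == "sql":
--             text = (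
--                 "TYPE\nMapper Query\n\n"
--                 f"PROJECT\n{item.get('project', _project_name(file_path))}\n\n"
--                 f"FILE\n{item.get('file_path', file_path)}\n\n"
--                 f"METHOD\n{name}\n\n"
--                 f"SQL TYPE\n{item.get('sql_type', '')}\n\n"
--                 f"DESCRIPTION\n{desc}"
--             )
--         elif kind.startswith("jsp"):
--             text = (
--                 "TYPE\nJSP Page\n\n"
--                 f"PROJECT\n{item.get('project', _project_name(file_path))}\n\n"
--                 f"FILE\n{item.get('file_path', file_path)}\n\n"
--                 f"KIND\n{kind}\n\n"
--                 f"KEYWORD\n{name}\n\n"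
--                 f"DESCRIPTION\n{desc}"
--             )
--         elif kind == "template_ref":
--             text = (
--                 "TYPE\nTemplate Reference\n\n"
--                 f"PROJECT\n{item.get('project', _project_name(file_path))}\n\n"
--                 f"FILE\n{item.get('file_path', file_path)}\n\n"
--                 f"ASSET TYPE\n{item.get('asset_type', 'template')}\n\n"
--                 f"DESCRIPTION\n{desc}"
--             )
--         else:
--             text = (
--                 "TYPE\nConfig File\n\n"
--                 f"PROJECT\n{item.get('project', _project_name(file_path))}\n\n"
--                 f"FILE\n{item.get('file_path', file_path)}\n\n"
--                 f"KEY\n{name}\n\n"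
--                 f"VALUE\n{desc}"
--             )
--
--         if len(text.strip()) > 20:
--             yield text, {"file": item.get("file_path", file_path), "type": kind, "name": name}
-- ===== SOURCE B (Python) =====
-- def _project_name(file_path: str) -> str:
--     normalized = file_path.replace("\\", "/").strip("/")
--     if not normalized:
--         return "unknown"
--     return normalized.split("/", 1)[0]
--
--
-- _FIELD_TABLE = {
--     "method": ("Controller/Service Method", [
--         ("CLASS", lambda i, k, n, d, f: i.get("class_name", "")),
--         ("METHOD", lambda i, k, n, d, f: i.get("method_name", "") + "()"),
--         ("SIGNATURE", lambda i, k, n, d, f: i.get("signature", "")),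
--         ("PARAMETERS", lambda i, k, n, d, f: i.get("parameters", "")),
--         ("RETURN TYPE", lambda i, k, n, d, f: i.get("return_type", "")),
--         ("DESCRIPTION", lambda i, k, n, d, f: d),
--     ]),
--     "sql": ("Mapper Query", [
--         ("METHOD", lambda i, k, n, d, f: n),
--         ("SQL TYPE", lambda i, k, n, d, f: i.get("sql_type", "")),
--         ("DESCRIPTION", lambda i, k, n, d, f: d),
--     ]),
--     "jsp": ("JSP Page", [
--         ("KIND", lambda i, k, n, d, f: k),
--         ("KEYWORD", lambda i, k, n, d, f: n),
--         ("DESCRIPTION", lambda i, k, n, d, f: d),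
--     ]),
--     "template": ("Template Reference", [
--         ("ASSET TYPE", lambda i, k, n, d, f: i.get("asset_type", "template")),
--         ("DESCRIPTION", lambda i, k, n, d, f: d),
--     ]),
--     "config": ("Config File", [
--         ("KEY", lambda i, k, n, d, f: n),
--         ("VALUE", lambda i, k, n, d, f: d),
--     ]),
-- }
--
--
-- def _item_chunk(item, file_path):
--     kind = item.get("type", "item")
--     name = item.get("name", "")
--     desc = (item.get("description") or item.get("comment") or "").strip()
--
--     if kind == "method":
--         cat = "method"
--     elif kind == "sql":
--         cat = "sql"
--     elif kind.startswith("jsp"):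
--         cat = "jsp"
--     elif kind == "template_ref":
--         cat = "template"
--     else:
--         cat = "config"
--
--     type_label, specs = _FIELD_TABLE[cat]
--     fields = [
--         ("TYPE", type_label),
--         ("PROJECT", item.get("project", _project_name(file_path))),
--         ("FILE", item.get("file_path", file_path)),
--     ]
--     for label, fn in specs:
--         fields.append((label, fn(item, kind, name, desc, file_path)))
--     text = "\n\n".join(f"{label}\n{value}" for label, value in fields)
--
--     if len(text.strip()) > 20:
--         return text, {"file": item.get("file_path", file_path), "type": kind, "name": name}
--     return None
--
--
-- def structure_to_chunks(items, file_path, max_per_chunk=8):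
--     for item in items:
--         chunk = _item_chunk(item, file_path)
--         if chunk is not None:
--             yield chunk
-- ===== Notes on version B (the rewrite author's own statement) =====
-- stated objective: simpler
-- what changed: A's five hand-written multi-line f-string branches are replaced by a kind-to-category map plus a category-to-field-spec table, with the text assembled uniformly by joining LABEL\nvalue sections and the per-item result returned as an Optional by one helper.
import Mathlib
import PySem

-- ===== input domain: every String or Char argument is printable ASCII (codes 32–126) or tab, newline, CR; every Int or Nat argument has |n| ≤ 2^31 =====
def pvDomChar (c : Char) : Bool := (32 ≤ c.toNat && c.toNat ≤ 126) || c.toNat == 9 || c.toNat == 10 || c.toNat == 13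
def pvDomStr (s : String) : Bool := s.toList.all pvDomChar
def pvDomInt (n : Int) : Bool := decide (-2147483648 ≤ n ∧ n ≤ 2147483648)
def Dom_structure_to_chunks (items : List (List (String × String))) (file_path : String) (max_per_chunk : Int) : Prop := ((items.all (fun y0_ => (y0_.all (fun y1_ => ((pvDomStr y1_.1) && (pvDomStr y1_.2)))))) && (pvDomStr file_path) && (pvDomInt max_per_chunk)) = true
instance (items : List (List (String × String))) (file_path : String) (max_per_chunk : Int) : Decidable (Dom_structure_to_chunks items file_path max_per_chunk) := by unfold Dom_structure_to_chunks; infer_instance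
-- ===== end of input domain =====

-- B replaces A's five hand-written f-string branches by one kind→category map plus a
-- category→field-spec table joined uniformly (objective: simpler decomposition, same cost).

-- ===== PORT A =====
-- item.get(k, dflt) / item.get(k) on the dict `item` (assoc list, first match)
def pvGetD (item : List (String × String)) (k dflt : String) : String :=
  (PySem.Dict.mk item).getD k dflt

def pvGet? (item : List (String × String)) (k : String) : Option String :=
  (PySem.Dict.mk item).get? k

-- Python `x or y` on a string-valued get (None or "" falls through)
def pvOrStr (a? : Option String) (b : String) : String :=
  match a? with
  | some s => if s = "" then b else s
  | none => b

-- (item.get("description") or item.get("comment") or "").strip()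
def pvDesc (item : List (String × String)) : String :=
  PySem.Str.strip (pvOrStr (pvGet? item "description") (pvOrStr (pvGet? item "comment") ""))

def pvProjectName (file_path : String) : String :=
  let normalized := PySem.Str.stripChars (PySem.Str.replace file_path "\\" "/") "/"
  if normalized = "" then "unknown"
  else
    -- normalized.split("/", 1)[0]; split of a nonempty separator is never empty, so [0] cannot raise
    (((PySem.Str.splitMax? normalized "/" 1).getD []).headD "")

-- the body of A's `for item in items` loop (appends the yielded pair to the accumulator)
def pvStepA (file_path : String) (acc : List (String × (List (String × String)))) (item : List (String × String)) : List (String × (List (String × String))) :=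
  let kind := pvGetD item "type" "item"
  let name := pvGetD item "name" ""
  let desc := pvDesc item
  let text :=
    if kind = "method" then
      "TYPE\nController/Service Method\n\nPROJECT\n" ++ pvGetD item "project" (pvProjectName file_path)
        ++ "\n\nFILE\n" ++ pvGetD item "file_path" file_path
        ++ "\n\nCLASS\n" ++ pvGetD item "class_name" ""
        ++ "\n\nMETHOD\n" ++ pvGetD item "method_name" "" ++ "()"
        ++ "\n\nSIGNATURE\n" ++ pvGetD item "signature" ""
        ++ "\n\nPARAMETERS\n" ++ pvGetD item "parameters" ""
        ++ "\n\nRETURN TYPE\n" ++ pvGetD item "return_type" ""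
        ++ "\n\nDESCRIPTION\n" ++ desc
    else if kind = "sql" then
      "TYPE\nMapper Query\n\nPROJECT\n" ++ pvGetD item "project" (pvProjectName file_path)
        ++ "\n\nFILE\n" ++ pvGetD item "file_path" file_path
        ++ "\n\nMETHOD\n" ++ name
        ++ "\n\nSQL TYPE\n" ++ pvGetD item "sql_type" ""
        ++ "\n\nDESCRIPTION\n" ++ desc
    else if PySem.Str.startswith kind "jsp" then
      "TYPE\nJSP Page\n\nPROJECT\n" ++ pvGetD item "project" (pvProjectName file_path)
        ++ "\n\nFILE\n" ++ pvGetD item "file_path" file_path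
        ++ "\n\nKIND\n" ++ kind
        ++ "\n\nKEYWORD\n" ++ name
        ++ "\n\nDESCRIPTION\n" ++ desc
    else if kind = "template_ref" then
      "TYPE\nTemplate Reference\n\nPROJECT\n" ++ pvGetD item "project" (pvProjectName file_path)
        ++ "\n\nFILE\n" ++ pvGetD item "file_path" file_path
        ++ "\n\nASSET TYPE\n" ++ pvGetD item "asset_type" "template"
        ++ "\n\nDESCRIPTION\n" ++ desc
    else
      "TYPE\nConfig File\n\nPROJECT\n" ++ pvGetD item "project" (pvProjectName file_path)
        ++ "\n\nFILE\n" ++ pvGetD item "file_path" file_path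
        ++ "\n\nKEY\n" ++ name
        ++ "\n\nVALUE\n" ++ desc
  if (20 : Int) < PySem.Str.len (PySem.Str.strip text) then
    acc ++ [(text, [("file", pvGetD item "file_path" file_path), ("type", kind), ("name", name)])]
  else acc

def structure_to_chunks (items : List (List (String × String))) (file_path : String) (max_per_chunk : Int) : List (String × (List (String × String))) :=
  items.foldl (pvStepA file_path) []

-- ===== PORT B =====
inductive PvCat : Type
  | method | sql | jsp | template | config
deriving DecidableEq, Repr

-- _FIELD_TABLE: category ↦ (TYPE label, ordered field specs taking (item, kind, name, desc, file_path))
def pvFieldTable (c : PvCat) : String × List (String × (List (String × String) → String → String → String → String → String)) :=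
  match c with
  | .method => ("Controller/Service Method",
      [("CLASS", fun i _ _ _ _ => pvGetD i "class_name" ""),
       ("METHOD", fun i _ _ _ _ => pvGetD i "method_name" "" ++ "()"),
       ("SIGNATURE", fun i _ _ _ _ => pvGetD i "signature" ""),
       ("PARAMETERS", fun i _ _ _ _ => pvGetD i "parameters" ""),
       ("RETURN TYPE", fun i _ _ _ _ => pvGetD i "return_type" ""),
       ("DESCRIPTION", fun _ _ _ d _ => d)])
  | .sql => ("Mapper Query",
      [("METHOD", fun _ _ n _ _ => n),
       ("SQL TYPE", fun i _ _ _ _ => pvGetD i "sql_type" ""),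
       ("DESCRIPTION", fun _ _ _ d _ => d)])
  | .jsp => ("JSP Page",
      [("KIND", fun _ k _ _ _ => k),
       ("KEYWORD", fun _ _ n _ _ => n),
       ("DESCRIPTION", fun _ _ _ d _ => d)])
  | .template => ("Template Reference",
      [("ASSET TYPE", fun i _ _ _ _ => pvGetD i "asset_type" "template"),
       ("DESCRIPTION", fun _ _ _ d _ => d)])
  | .config => ("Config File",
      [("KEY", fun _ _ n _ _ => n),
       ("VALUE", fun _ _ _ d _ => d)])

def pvItemChunk (item : List (String × String)) (file_path : String) : Option (String × (List (String × String))) :=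
  let kind := pvGetD item "type" "item"
  let name := pvGetD item "name" ""
  let desc := pvDesc item
  let cat : PvCat :=
    if kind = "method" then .method
    else if kind = "sql" then .sql
    else if PySem.Str.startswith kind "jsp" then .jsp
    else if kind = "template_ref" then .template
    else .config
  let tl := pvFieldTable cat
  let fields := [("TYPE", tl.1),
                 ("PROJECT", pvGetD item "project" (pvProjectName file_path)),
                 ("FILE", pvGetD item "file_path" file_path)]
                ++ tl.2.map (fun p => (p.1, p.2 item kind name desc file_path))
  let text := PySem.Str.join "\n\n" (fields.map (fun p => p.1 ++ "\n" ++ p.2))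
  if (20 : Int) < PySem.Str.len (PySem.Str.strip text) then
    some (text, [("file", pvGetD item "file_path" file_path), ("type", kind), ("name", name)])
  else none

def structure_to_chunks_alt (items : List (List (String × String))) (file_path : String) (max_per_chunk : Int) : List (String × (List (String × String))) :=
  items.filterMap (fun item => pvItemChunk item file_path)

-- ===== PRECONDITION & SPEC =====
def Spec_structure_to_chunks (items : List (List (String × String))) (file_path : String) (max_per_chunk : Int) (out : List (String × (List (String × String)))) : Prop := out = structure_to_chunks_alt items file_path max_per_chunk
instance (items : List (List (String × String))) (file_path : String) (max_per_chunk : Int) (out : List (String × (List (String × String)))) : Decidable (Spec_structure_to_chunks items file_path max_per_chunk out) := by unfold Spec_structure_to_chunks; infer_instance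

-- ===== CLAIM (what is proved, stated in full; the proofs are below) =====
def Claim_equal_structure_to_chunks : Prop := ∀ (items : List (List (String × String))) (file_path : String) (max_per_chunk : Int), Dom_structure_to_chunks items file_path max_per_chunk → Spec_structure_to_chunks items file_path max_per_chunk (structure_to_chunks items file_path max_per_chunk)

-- ===== LEMMAS AND PROOFS =====
-- A's per-item step appends exactly the optional chunk B computes for that item.
lemma pvStepA_eq (file_path : String) (acc : List (String × (List (String × String)))) (item : List (String × String)) :
    pvStepA file_path acc item = acc ++ (pvItemChunk item file_path).toList := by
  have key : ∀ (tA tB : String) (m : List (String × String)), tB = tA →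
      (if (20 : Int) < PySem.Str.len (PySem.Str.strip tA) then acc ++ [(tA, m)] else acc)
      = acc ++ (if (20 : Int) < PySem.Str.len (PySem.Str.strip tB) then some (tB, m) else none).toList := by
    intro tA tB m h; subst h; split <;> simp
  simp only [pvStepA, pvItemChunk]
  by_cases h1 : pvGetD item "type" "item" = "method"
  · simp only [if_pos h1, pvFieldTable, List.map_cons, List.map_nil, List.cons_append, List.nil_append]
    exact key _ _ _ (by rw [← String.toList_inj]; simp [PySem.Str.join, PySem.Chars.join, List.intercalate])
  by_cases h2 : pvGetD item "type" "item" = "sql"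
  · simp only [if_neg h1, if_pos h2, pvFieldTable, List.map_cons, List.map_nil, List.cons_append, List.nil_append]
    exact key _ _ _ (by rw [← String.toList_inj]; simp [PySem.Str.join, PySem.Chars.join, List.intercalate])
  by_cases h3 : PySem.Str.startswith (pvGetD item "type" "item") "jsp" = true
  · simp only [if_neg h1, if_neg h2, if_pos h3, pvFieldTable, List.map_cons, List.map_nil, List.cons_append, List.nil_append]
    exact key _ _ _ (by rw [← String.toList_inj]; simp [PySem.Str.join, PySem.Chars.join, List.intercalate])
  by_cases h4 : pvGetD item "type" "item" = "template_ref"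
  · simp only [if_neg h1, if_neg h2, if_neg h3, if_pos h4, pvFieldTable, List.map_cons, List.map_nil, List.cons_append, List.nil_append]
    exact key _ _ _ (by rw [← String.toList_inj]; simp [PySem.Str.join, PySem.Chars.join, List.intercalate])
  · simp only [if_neg h1, if_neg h2, if_neg h3, if_neg h4, pvFieldTable, List.map_cons, List.map_nil, List.cons_append, List.nil_append]
    exact key _ _ _ (by rw [← String.toList_inj]; simp [PySem.Str.join, PySem.Chars.join, List.intercalate])

lemma pvFold_eq (file_path : String) (items : List (List (String × String))) (acc : List (String × (List (String × String)))) :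
    items.foldl (pvStepA file_path) acc = acc ++ items.filterMap (fun item => pvItemChunk item file_path) := by
  induction items generalizing acc with
  | nil => simp
  | cons x xs ih =>
    simp only [List.foldl_cons, List.filterMap_cons, ih, pvStepA_eq]
    cases pvItemChunk x file_path <;> simp

-- ===== VERDICT (by name: the statement is the Claim_ definition above) =====
theorem structure_to_chunks_spec : Claim_equal_structure_to_chunks := by
  intro items file_path max_per_chunk _
  unfold Spec_structure_to_chunks structure_to_chunks structure_to_chunks_alt
  simpa using pvFold_eq file_path items []
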